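-- pv_equiv track=rewrite | github.com/stkgr/Vitalii_Potapenko | Collections_refactored.py | create_result_dictionary
-- ===== SOURCE A (Python) =====
-- def create_result_dictionary(common_dict, list_of_dict):
--     result = {}
--     for common_letter in common_dict:
--         letter_count = 0
--         dict_index = 0
--         for nested_dict in list_of_dict:
--             for key_letter in nested_dict:
--                 # Check if the letter of the current dictionary is in the common dictionary
--                 if key_letter == common_letter:
--                     # Increase the quantity of the letter
--                     letter_count += 1
--         # Check if the letter is in more than one dictionary
--         if letter_count > 1:
--             for nested_dict in list_of_dict:
--                 # Increase the index of the dictionary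
--                 dict_index += 1
--                 for key_letter in nested_dict:
--                     # Check if the common dictionary has the key from the current dictionary and if the values are equal
--                     if key_letter == common_letter and nested_dict[key_letter] == common_dict[key_letter]:
--                         # Add the key with dictionary number and the value to the result dictionary
--                         result.update({str(key_letter)+'_'+str(dict_index): nested_dict[key_letter]})
--         # If the letter is in only one dictionary
--         else:
--             # Add the key without the dictionary number and the value to the result dictionary
--             result.update({common_letter: common_dict[common_letter]})
--     return result
-- ===== SOURCE B (Python) =====
-- def create_result_dictionary(common_dict, list_of_dict):
--     # One pass over list_of_dict builds an index: letter -> list of (1-based dict index, value).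
--     table = {}
--     index = 0
--     for nested_dict in list_of_dict:
--         index += 1
--         for key, value in nested_dict.items():
--             table.setdefault(key, []).append((index, value))
--     result = {}
--     for letter, common_value in common_dict.items():
--         occurrences = table.get(letter, [])
--         if len(occurrences) > 1:
--             for idx, value in occurrences:
--                 if value == common_value:
--                     result[letter + '_' + str(idx)] = value
--         else:
--             result[letter] = common_value
--     return result
-- ===== Notes on version B (the rewrite author's own statement) =====
-- stated objective: faster
-- what changed: Instead of A's per-letter triple-nested rescans of all sub-dicts (one pass to count, another to emit), B makes a single pass over list_of_dict building an index letter -> [(dict index, value)], then emits the result table-driven from that index.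
import Mathlib
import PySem

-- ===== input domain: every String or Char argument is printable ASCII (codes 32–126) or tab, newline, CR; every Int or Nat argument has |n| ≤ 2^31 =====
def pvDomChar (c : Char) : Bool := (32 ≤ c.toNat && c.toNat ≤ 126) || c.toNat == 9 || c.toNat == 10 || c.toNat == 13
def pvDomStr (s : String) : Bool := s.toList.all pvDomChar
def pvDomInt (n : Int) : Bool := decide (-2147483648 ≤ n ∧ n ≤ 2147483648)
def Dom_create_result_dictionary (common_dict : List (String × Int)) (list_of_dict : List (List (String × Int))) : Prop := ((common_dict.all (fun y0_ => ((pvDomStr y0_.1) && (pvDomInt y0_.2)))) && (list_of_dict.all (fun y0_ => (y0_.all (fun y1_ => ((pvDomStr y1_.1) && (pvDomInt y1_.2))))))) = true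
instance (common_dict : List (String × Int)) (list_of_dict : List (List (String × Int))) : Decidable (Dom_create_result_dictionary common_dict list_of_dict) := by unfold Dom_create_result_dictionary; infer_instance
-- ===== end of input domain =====

-- B replaces A's per-letter rescans of list_of_dict by a single index-building pass plus a
-- table-driven emission pass (objective: faster).

-- ===== PORT A =====
-- dict arguments are decoded with PySem.Dict.ofList (Python dict semantics: first position,
-- last value on duplicate keys); 'nested_dict[key_letter]' / 'common_dict[key_letter]' are
-- ported as getD with default 0 — exact, because the key is always present at those accesses.
def create_result_dictionary (common_dict : List (String × Int)) (list_of_dict : List (List (String × Int))) : List (String × Int) :=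
  let common := PySem.Dict.ofList common_dict
  let dicts := list_of_dict.map PySem.Dict.ofList
  (common.keys.foldl (fun (result : PySem.Dict String Int) common_letter =>
      let letter_count : Int :=
        dicts.foldl (fun c nested_dict =>
          nested_dict.keys.foldl (fun c key_letter =>
            if key_letter == common_letter then c + 1 else c) c) 0
      if letter_count > 1 then
        (dicts.foldl (fun (st : PySem.Dict String Int × Int) nested_dict =>
            let dict_index := st.2 + 1
            (nested_dict.keys.foldl (fun r key_letter =>
                if key_letter == common_letter &&
                   (nested_dict.getD key_letter 0 == common.getD key_letter 0) then
                  r.insert (key_letter ++ "_" ++ PySem.Int.toStr dict_index)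
                           (nested_dict.getD key_letter 0)
                else r) st.1, dict_index)) (result, (0 : Int))).1
      else result.insert common_letter (common.getD common_letter 0))
    PySem.Dict.empty).items

-- ===== PORT B =====
-- 'table.setdefault(key, []).append((index, value))' is ported as Dict.modify key [] (· ++ [(index, value)]).
def create_result_dictionary_alt (common_dict : List (String × Int)) (list_of_dict : List (List (String × Int))) : List (String × Int) :=
  let dicts := list_of_dict.map PySem.Dict.ofList
  let table := (dicts.foldl (fun (st : PySem.Dict String (List (Int × Int)) × Int) nested_dict =>
      let index := st.2 + 1
      (nested_dict.items.foldl (fun t q => t.modify q.1 [] (· ++ [(index, q.2)])) st.1, index))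
    (PySem.Dict.empty, (0 : Int))).1
  ((PySem.Dict.ofList common_dict).items.foldl (fun (result : PySem.Dict String Int) p =>
      let occurrences := table.getD p.1 []
      if occurrences.length > 1 then
        occurrences.foldl (fun r e =>
          if e.2 == p.2 then r.insert (p.1 ++ "_" ++ PySem.Int.toStr e.1) e.2 else r) result
      else result.insert p.1 p.2) PySem.Dict.empty).items

-- ===== PRECONDITION & SPEC =====
def Spec_create_result_dictionary (common_dict : List (String × Int)) (list_of_dict : List (List (String × Int))) (out : List (String × Int)) : Prop := out = create_result_dictionary_alt common_dict list_of_dict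
instance (common_dict : List (String × Int)) (list_of_dict : List (List (String × Int))) (out : List (String × Int)) : Decidable (Spec_create_result_dictionary common_dict list_of_dict out) := by unfold Spec_create_result_dictionary; infer_instance

-- ===== CLAIM (what is proved, stated in full; the proofs are below) =====
def Claim_equal_create_result_dictionary : Prop := ∀ (common_dict : List (String × Int)) (list_of_dict : List (List (String × Int))), Dom_create_result_dictionary common_dict list_of_dict → Spec_create_result_dictionary common_dict list_of_dict (create_result_dictionary common_dict list_of_dict)

-- ===== LEMMAS AND PROOFS =====

-- the (1-based index, value) occurrence list of letter cl across the dicts, starting at index i0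
def pvEmit (cl : String) : List (PySem.Dict String Int) → Int → List (Int × Int)
  | [], _ => []
  | nd :: rest, i0 =>
      (nd.items.filter (fun q => q.1 == cl)).map (fun q => (i0 + 1, q.2)) ++ pvEmit cl rest (i0 + 1)

-- B's table lookup is exactly the occurrence list
theorem pv_table_getD (cl : String) (dicts : List (PySem.Dict String Int))
    (t : PySem.Dict String (List (Int × Int))) (i0 : Int) :
    ((dicts.foldl (fun (st : PySem.Dict String (List (Int × Int)) × Int) nested_dict =>
        let index := st.2 + 1
        (nested_dict.items.foldl (fun t q => t.modify q.1 [] (· ++ [(index, q.2)])) st.1, index))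
      (t, i0)).1).getD cl [] = t.getD cl [] ++ pvEmit cl dicts i0 := by
  induction dicts generalizing t i0 with
  | nil => simp [pvEmit]
  | cons nd rest ih =>
      simp only [List.foldl_cons, pvEmit]
      rw [ih]
      have hinner : (nd.items.foldl (fun t q => t.modify q.1 [] (· ++ [(i0 + 1, q.2)])) t).getD cl []
          = t.getD cl [] ++ (nd.items.filter (fun q => q.1 == cl)).map (fun q => (i0 + 1, q.2)) := by
        have := PySem.Dict.getD_foldl_modify_append
          (l := nd.items.map (fun q => (q.1, ((i0 + 1 : Int), q.2)))) (d := t) (c := cl)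
        rw [List.foldl_map] at this
        simpa [List.filter_map, Function.comp] using this
      simp [hinner, List.append_assoc]

-- A's letter count is the length of the occurrence list
theorem pv_count (cl : String) (dicts : List (PySem.Dict String Int)) (c : Int) (i0 : Int) :
    dicts.foldl (fun c nested_dict =>
        nested_dict.keys.foldl (fun c key_letter =>
          if key_letter == cl then c + 1 else c) c) c
      = c + ((pvEmit cl dicts i0).length : Int) := by
  induction dicts generalizing c i0 with
  | nil => simp [pvEmit]
  | cons nd rest ih =>
      simp only [List.foldl_cons, pvEmit]
      have : nd.keys.foldl (fun c key_letter => if key_letter == cl then c + 1 else c) c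
          = c + ((nd.items.filter (fun q => q.1 == cl)).length : Int) := by
        have h : nd.keys = nd.items.map (·.1) := rfl
        rw [h, List.foldl_map]
        induction nd.items generalizing c with
        | nil => simp
        | cons q qs ihq =>
            simp only [List.foldl_cons]
            by_cases hq : q.1 == cl
            · rw [if_pos hq, ihq]
              simp only [List.filter_cons, hq, if_pos, List.length_cons]
              push_cast; ring
            · rw [if_neg hq, ihq]
              simp only [List.filter_cons, hq, Bool.false_eq_true, ite_false]
      rw [this, ih _ (i0 + 1)]
      simp only [List.length_append, List.length_map]
      push_cast
      omega

-- A's emission pass equals B's fold over the occurrence list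
theorem pv_emit (cl : String) (v : Int) (common : PySem.Dict String Int)
    (hv : common.getD cl 0 = v)
    (dicts : List (PySem.Dict String Int)) (hnd : ∀ nd ∈ dicts, nd.keys.Nodup)
    (r : PySem.Dict String Int) (i0 : Int) :
    (dicts.foldl (fun (st : PySem.Dict String Int × Int) nested_dict =>
        let dict_index := st.2 + 1
        (nested_dict.keys.foldl (fun r key_letter =>
            if key_letter == cl &&
               (nested_dict.getD key_letter 0 == common.getD key_letter 0) then
              r.insert (key_letter ++ "_" ++ PySem.Int.toStr dict_index)
                       (nested_dict.getD key_letter 0)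
            else r) st.1, dict_index)) (r, i0)).1
      = (pvEmit cl dicts i0).foldl (fun r e =>
          if e.2 == v then r.insert (cl ++ "_" ++ PySem.Int.toStr e.1) e.2 else r) r := by
  induction dicts generalizing r i0 with
  | nil => simp [pvEmit]
  | cons nd rest ih =>
      simp only [List.foldl_cons, pvEmit, List.foldl_append]
      rw [ih (fun d hd => hnd d (List.mem_cons_of_mem _ hd))]
      congr 1
      have hnodup : nd.keys.Nodup := hnd nd List.mem_cons_self
      rw [show nd.keys = nd.items.map (·.1) from rfl, List.foldl_map, List.foldl_map,
        List.foldl_filter]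
      apply PySem.List.foldl_congr_mem
      intro r q hq
      by_cases hcl : q.1 == cl
      · have hcl' : q.1 = cl := eq_of_beq hcl
        have hgd : nd.getD cl 0 = q.2 := by
          rw [← hcl']
          exact PySem.Dict.getD_of_mem_items nd (by simpa using hq) hnodup 0
        simp [hcl', hgd, hv]
      · simp [hcl]

theorem pv_main (common_dict : List (String × Int)) (list_of_dict : List (List (String × Int))) :
    create_result_dictionary common_dict list_of_dict
      = create_result_dictionary_alt common_dict list_of_dict := by
  simp only [create_result_dictionary, create_result_dictionary_alt]
  have hnodc : (PySem.Dict.ofList common_dict).keys.Nodup := PySem.Dict.nodup_keys_ofList _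
  have hnods : ∀ nd ∈ list_of_dict.map PySem.Dict.ofList, nd.keys.Nodup := by
    intro nd hnd
    obtain ⟨l, _, rfl⟩ := List.mem_map.mp hnd
    exact PySem.Dict.nodup_keys_ofList _
  congr 1
  rw [show (PySem.Dict.ofList common_dict).keys
      = (PySem.Dict.ofList common_dict).items.map (·.1) from rfl, List.foldl_map]
  apply PySem.List.foldl_congr_mem
  intro result p hp
  have hv : (PySem.Dict.ofList common_dict).getD p.1 0 = p.2 :=
    PySem.Dict.getD_of_mem_items _ (by simpa using hp) hnodc 0
  simp only [pv_table_getD, pv_count (i0 := 0), PySem.Dict.getD_empty, List.nil_append]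
  by_cases hlen : (pvEmit p.1 (list_of_dict.map PySem.Dict.ofList) 0).length > 1
  · rw [if_pos (by omega), if_pos hlen]
    exact pv_emit p.1 p.2 _ hv _ hnods result 0
  · rw [if_neg (by omega), if_neg hlen, hv]

-- ===== VERDICT (by name: the statement is the Claim_ definition above) =====
theorem create_result_dictionary_spec : Claim_equal_create_result_dictionary := by
  intro common_dict list_of_dict _
  exact pv_main common_dict list_of_dict
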